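-- pv_equiv track=rewrite | github.com/a-tal/nagaram | nagaram/scrabble.py | valid_scrabble_word
-- ===== SOURCE A (Python) =====
-- def valid_scrabble_word(word):
--     """Checks if the input word could be played with a full bag of tiles.
--
--     Returns:
--         True or false
--     """
--
--     letters_in_bag = {
--         "a": 9,
--         "b": 2,
--         "c": 2,
--         "d": 4,
--         "e": 12,
--         "f": 2,
--         "g": 3,
--         "h": 2,
--         "i": 9,
--         "j": 1,
--         "k": 1,
--         "l": 4,
--         "m": 2,
--         "n": 6,
--         "o": 8,
--         "p": 2,
--         "q": 1,
--         "r": 6,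
--         "s": 4,
--         "t": 6,
--         "u": 4,
--         "v": 2,
--         "w": 2,
--         "x": 1,
--         "y": 2,
--         "z": 1,
--         "_": 2,
--     }
--
--     for letter in word:
--         if letter == "?":
--             continue
--         try:
--             letters_in_bag[letter] -= 1
--         except KeyError:
--             return False
--         if letters_in_bag[letter] < 0:
--             letters_in_bag["_"] -= 1
--             if letters_in_bag["_"] < 0:
--                 return False
--     return True
-- ===== SOURCE B (Python) =====
-- LETTER_ORDER = "abcdefghijklmnopqrstuvwxyz"
-- LETTER_COUNTS = [9, 2, 2, 4, 12, 2, 3, 2, 9, 1, 1, 4, 2, 6, 8, 2, 1, 6, 4, 6, 4, 2, 2, 1, 2, 1]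
--
--
-- def valid_scrabble_word(word):
--     """Checks if the input word could be played with a full bag of tiles.
--
--     Returns:
--         True or false
--     """
--
--     if any(c not in LETTER_ORDER and c not in "_?" for c in word):
--         return False
--     blanks_needed = word.count("_") + sum(
--         max(0, word.count(letter) - supply)
--         for letter, supply in zip(LETTER_ORDER, LETTER_COUNTS)
--     )
--     return blanks_needed <= 2
-- ===== Notes on version B (the rewrite author's own statement) =====
-- stated objective: alternative
-- what changed: Replaces A's per-character mutate-the-bag loop (decrement each tile, fall back to blanks one at a time) with a whole-word membership check followed by a closed-form blank-deficit sum max(0, word.count(letter) - supply) over the fixed 26-letter supply table, compared against the blank budget of 2.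
import Mathlib
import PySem

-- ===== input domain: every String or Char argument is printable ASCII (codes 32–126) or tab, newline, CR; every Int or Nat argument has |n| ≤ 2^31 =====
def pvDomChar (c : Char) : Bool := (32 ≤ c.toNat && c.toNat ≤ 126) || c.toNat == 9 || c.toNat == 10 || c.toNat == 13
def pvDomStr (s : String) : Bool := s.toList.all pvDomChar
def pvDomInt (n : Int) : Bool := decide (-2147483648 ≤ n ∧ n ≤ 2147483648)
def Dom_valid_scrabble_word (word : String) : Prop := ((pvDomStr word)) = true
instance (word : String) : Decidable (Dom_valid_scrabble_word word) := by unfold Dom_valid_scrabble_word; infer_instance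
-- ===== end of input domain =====

-- B replaces A's per-character mutate-the-bag loop by a membership check plus a closed-form
-- blank-deficit sum over the 26 letters (objective: alternative, same cost).

-- ===== PORT A =====
-- the dict literal `letters_in_bag` of A
def bagA : PySem.Dict Char Int := PySem.Dict.ofList
  [('a',9),('b',2),('c',2),('d',4),('e',12),('f',2),('g',3),('h',2),('i',9),('j',1),('k',1),
   ('l',4),('m',2),('n',6),('o',8),('p',2),('q',1),('r',6),('s',4),('t',6),('u',4),('v',2),
   ('w',2),('x',1),('y',2),('z',1),('_',2)]

-- A's `for letter in word` loop; `letters_in_bag[letter] -= 1` = read (KeyError → none) then insert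
def loopA : List Char → PySem.Dict Char Int → Bool
  | [], _ => true
  | letter :: rest, bag =>
    if letter = '?' then loopA rest bag
    else
      match bag.get? letter with
      | none => false
      | some v =>
        let bag1 := bag.insert letter (v - 1)
        if bag1.getD letter 0 < 0 then
          let bag2 := bag1.insert '_' (bag1.getD '_' 0 - 1)
          if bag2.getD '_' 0 < 0 then false else loopA rest bag2
        else loopA rest bag1

def valid_scrabble_word (word : String) : Bool := loopA word.toList bagA

-- ===== PORT B =====
-- B's module constants LETTER_ORDER and LETTER_COUNTS
def letterOrder : List Char := "abcdefghijklmnopqrstuvwxyz".toList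
def letterCounts : List Int := [9, 2, 2, 4, 12, 2, 3, 2, 9, 1, 1, 4, 2, 6, 8, 2, 1, 6, 4, 6, 4, 2, 2, 1, 2, 1]

def valid_scrabble_word_alt (word : String) : Bool :=
  if word.toList.any (fun c => !(letterOrder.contains c) && !("_?".toList.contains c)) then
    false
  else
    let blanksNeeded : Int :=
      (word.toList.count '_' : Int)
        + ((letterOrder.zip letterCounts).map
            (fun p => max 0 ((word.toList.count p.1 : Int) - p.2))).sum
    decide (blanksNeeded ≤ 2)

-- ===== PRECONDITION & SPEC =====
def Spec_valid_scrabble_word (word : String) (out : Bool) : Prop := out = valid_scrabble_word_alt word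
instance (word : String) (out : Bool) : Decidable (Spec_valid_scrabble_word word out) := by unfold Spec_valid_scrabble_word; infer_instance

-- ===== CLAIM (what is proved, stated in full; the proofs are below) =====
def Claim_equal_valid_scrabble_word : Prop := ∀ (word : String), Dom_valid_scrabble_word word → Spec_valid_scrabble_word word (valid_scrabble_word word)

-- ===== LEMMAS AND PROOFS =====

-- the 26 letter keys, in bag order ('_' kept separate)
def LETTERS : List Char :=
  ['a','b','c','d','e','f','g','h','i','j','k','l','m',
   'n','o','p','q','r','s','t','u','v','w','x','y','z']

-- common functional characterisation of both programs: every character is known (or '?'),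
-- and the blanks consumed ('_' tiles used directly plus each letter's deficit against the
-- current bag) fit in the current '_' budget
def FA (l : List Char) (d : PySem.Dict Char Int) : Bool :=
  l.all (fun c => c = '?' || d.contains c) &&
  decide ((l.count '_' : Int)
           + (LETTERS.map (fun c => max 0 ((l.count c : Int) - max 0 (d.getD c 0)))).sum
          ≤ d.getD '_' 0)

lemma letters_nodup : LETTERS.Nodup := by decide

lemma mem_letters_ne (x : Char) (hx : x ∈ LETTERS) : x ≠ '?' ∧ x ≠ '_' := by
  fin_cases hx <;> decide

lemma sum_map_nonneg (L : List Char) (f : Char → Int) (h : ∀ c ∈ L, 0 ≤ f c) :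
    0 ≤ (L.map f).sum := by
  induction L with
  | nil => simp
  | cons a t ih =>
    simp only [List.map_cons, List.sum_cons]
    have := h a (by simp)
    have := ih (fun c hc => h c (by simp [hc]))
    omega

-- updating f at one element of a nodup list shifts the mapped sum by the difference there
lemma sum_map_update (L : List Char) (hL : L.Nodup) (f g : Char → Int) (c : Char)
    (hc : c ∈ L) (hfg : ∀ x ∈ L, x ≠ c → f x = g x) :
    (L.map f).sum = (L.map g).sum + (f c - g c) := by
  induction L with
  | nil => simp at hc
  | cons a t ih =>
    simp only [List.map_cons, List.sum_cons]
    rcases List.mem_cons.mp hc with rfl | hct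
    · have heq : ∀ x ∈ t, f x = g x := fun x hx =>
        hfg x (by simp [hx]) (fun h => (List.nodup_cons.mp hL).1 (h ▸ hx))
      rw [List.map_congr_left heq]
      omega
    · have hac : a ≠ c := fun h => (List.nodup_cons.mp hL).1 (h ▸ hct)
      rw [hfg a (by simp) hac,
        ih (List.nodup_cons.mp hL).2 hct (fun x hx hxc => hfg x (by simp [hx]) hxc)]
      omega

set_option maxRecDepth 10000 in
lemma contains_bagA (x : Char) : bagA.contains x = decide (x ∈ LETTERS ∨ x = '_') := by
  have hk : bagA.keys = LETTERS ++ ['_'] := by rfl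
  rw [PySem.Dict.contains_eq_decide_mem_keys, hk, decide_eq_decide]
  simp [List.mem_append]

set_option maxRecDepth 10000 in
lemma bagA_pos : ∀ c ∈ LETTERS, 0 ≤ bagA.getD c 0 := by
  intro c hc; fin_cases hc <;> decide

set_option maxRecDepth 10000 in
lemma bagA_blank : bagA.getD '_' 0 = 2 := by decide

-- the loop invariant for A: on any bag with the original key set and a nonnegative
-- blank budget, loopA computes FA
lemma loopA_eq_FA (l : List Char) : ∀ d : PySem.Dict Char Int,
    (∀ x, d.contains x = decide (x ∈ LETTERS ∨ x = '_')) →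
    0 ≤ d.getD '_' 0 →
    loopA l d = FA l d := by
  induction l with
  | nil =>
    intro d _ h0
    simp only [loopA, FA, List.all_nil, List.count_nil, Bool.true_and, Nat.cast_zero]
    have hzs : (LETTERS.map (fun c => max 0 ((0 : Int) - max 0 (d.getD c 0)))).sum = 0 := by
      rw [List.map_congr_left (fun x _ => (by omega :
        max 0 ((0 : Int) - max 0 (d.getD x 0)) = 0))]
      simp
    rw [hzs, zero_add]
    exact (decide_eq_true h0).symm
  | cons c rest ih =>
    intro d hd h0
    by_cases hq : c = '?'
    · -- '?' is skipped: no count changes ('?' is neither '_' nor a letter)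
      subst hq
      rw [show loopA ('?' :: rest) d = loopA rest d from by simp [loopA], ih d hd h0]
      have hsum : LETTERS.map (fun x => max 0 ((rest.count x : Int) - max 0 (d.getD x 0)))
          = LETTERS.map (fun x => max 0 ((((('?' : Char) :: rest).count x : Int)) - max 0 (d.getD x 0))) := by
        apply List.map_congr_left
        intro x hx
        rw [List.count_cons_of_ne (Ne.symm (mem_letters_ne x hx).1)]
      have hcnt : (('?' : Char) :: rest).count '_' = rest.count '_' :=
        List.count_cons_of_ne (by decide : ('?' : Char) ≠ '_')
      simp only [FA, List.all_cons, ← hsum, hcnt]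
      simp
    · -- c is consumed
      by_cases hmem : c ∈ LETTERS ∨ c = '_'
      · -- c is a key: get? c = some (getD c 0)
        have hcont : d.contains c = true := by rw [hd c]; simpa using hmem
        have hget : d.get? c = some (d.getD c 0) := by
          rw [PySem.Dict.contains_eq_isSome_get?] at hcont
          cases hg : d.get? c with
          | none => rw [hg] at hcont; simp at hcont
          | some v => rw [PySem.Dict.getD_of_get?_eq_some d 0 hg]
        set v := d.getD c 0 with hv
        have hstep : loopA (c :: rest) d =
            (let bag1 := d.insert c (v - 1)
             if bag1.getD c 0 < 0 then
               let bag2 := bag1.insert '_' (bag1.getD '_' 0 - 1)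
               if bag2.getD '_' 0 < 0 then false else loopA rest bag2
             else loopA rest bag1) := by
          simp only [loopA, if_neg hq, hget]
        -- contains is unchanged by inserting at existing keys
        have hcont1 : ∀ w x, (d.insert c w).contains x = decide (x ∈ LETTERS ∨ x = '_') := by
          intro w x
          rw [PySem.Dict.contains_insert, hd x]
          by_cases hxc : x = c
          · subst hxc; simpa using hmem
          · simp [hxc]
        have hallc : ∀ (d' : PySem.Dict Char Int),
            (∀ x, d'.contains x = decide (x ∈ LETTERS ∨ x = '_')) →
            rest.all (fun x => x = '?' || d'.contains x)
              = (c :: rest).all (fun x => x = '?' || d.contains x) := by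
          intro d' hd'
          have h1 : rest.all (fun x => x = '?' || d'.contains x)
              = rest.all (fun x => x = '?' || d.contains x) :=
            List.all_congr rfl (fun x => by rw [hd' x, hd x])
          rw [h1, List.all_cons]
          have hco : (decide (c = '?') || d.contains c) = true := by simp [hcont]
          rw [hco, Bool.true_and]
        -- the deficit term at c alone exceeds an exhausted budget (used in both False branches)
        have hbig : ∀ hcl : c ∈ LETTERS ∨ c = '_', max 0 ((v : Int)) = 0 →
            d.getD '_' 0 - 1 < 0 →
            (FA (c :: rest) d) = false := by
          intro hcl hv0 hout
          have hsnn : 0 ≤ (LETTERS.map (fun x => max 0 ((((c :: rest).count x : Int)) - max 0 (d.getD x 0)))).sum :=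
            sum_map_nonneg _ _ (fun x _ => le_max_left _ _)
          have hcnt0 : (0 : Int) ≤ ((c :: rest).count '_' : Int) := by positivity
          have key : ¬ (((c :: rest).count '_' : Int)
              + (LETTERS.map (fun x => max 0 ((((c :: rest).count x : Int)) - max 0 (d.getD x 0)))).sum
              ≤ d.getD '_' 0) := by
            rcases hcl with hlet | hbl
            · -- the term at c contributes count ≥ 1
              have hterm : max 0 (((c :: rest).count c : Int) - max 0 v)
                  = ((c :: rest).count c : Int) := by
                have h1 : (1 : Int) ≤ ((c :: rest).count c : Int) := by
                  rw [List.count_cons_self]; push_cast; omega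
                omega
              have hle : ((c :: rest).count c : Int) ≤
                  (LETTERS.map (fun x => max 0 ((((c :: rest).count x : Int)) - max 0 (d.getD x 0)))).sum :=
                List.single_le_sum (by
                  intro y hy
                  simp only [List.mem_map] at hy
                  obtain ⟨x, _, rfl⟩ := hy
                  exact le_max_left _ _) _ (hterm ▸ List.mem_map_of_mem hlet)
              have hc1 : (1 : Int) ≤ ((c :: rest).count c : Int) := by
                rw [List.count_cons_self]; push_cast; omega
              omega
            · -- c = '_' contributes to the '_' count
              subst hbl
              have hc1 : (1 : Int) ≤ ((('_' : Char) :: rest).count '_' : Int) := by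
                rw [List.count_cons_self]; push_cast; omega
              have hvv : max 0 (d.getD '_' 0) = 0 := by rw [← hv]; exact hv0
              omega
          simp only [FA]
          simp [key]
        rcases hmem with hlet | hbl
        · -- c is one of the 26 letters
          have hcu : c ≠ '_' := (mem_letters_ne c hlet).2
          have hg1c : (d.insert c (v - 1)).getD c 0 = v - 1 :=
            PySem.Dict.getD_insert_self _ _ _ _
          have hg1u : (d.insert c (v - 1)).getD '_' 0 = d.getD '_' 0 :=
            PySem.Dict.getD_insert_of_ne _ _ _ (Ne.symm hcu)
          have hg2u' : ((d.insert c (v - 1)).insert '_' (d.getD '_' 0 - 1)).getD '_' 0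
              = d.getD '_' 0 - 1 := PySem.Dict.getD_insert_self _ _ _ _
          have hcnt : ((c :: rest).count '_' : Int) = (rest.count '_' : Int) := by
            rw [List.count_cons_of_ne hcu]
          rw [hstep]
          simp only [hg1c, hg1u, hg2u']
          split_ifs with hneg hout
          · -- deficit and no blank left: both sides false
            rw [hbig (Or.inl hlet) (by omega) hout]
          · -- deficit, a blank is spent
            set d2 := (d.insert c (v - 1)).insert '_' (d.getD '_' 0 - 1) with hd2
            have hcont2 : ∀ x, d2.contains x = decide (x ∈ LETTERS ∨ x = '_') := by
              intro x
              rw [hd2, PySem.Dict.contains_insert, hcont1 (v-1) x]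
              by_cases hxu : x = '_'
              · subst hxu; simp
              · simp [hxu]
            have hg2u2 : d2.getD '_' 0 = d.getD '_' 0 - 1 := by
              rw [hd2]; exact hg2u'
            have h02 : 0 ≤ d2.getD '_' 0 := by rw [hg2u2]; omega
            rw [ih d2 hcont2 h02]
            have hg2c : d2.getD c 0 = v - 1 := by
              rw [hd2, PySem.Dict.getD_insert_of_ne _ _ _ hcu, hg1c]
            have hg2x : ∀ x ∈ LETTERS, x ≠ c → d2.getD x 0 = d.getD x 0 := by
              intro x hx hxc
              have hxu : x ≠ '_' := (mem_letters_ne x hx).2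
              rw [hd2, PySem.Dict.getD_insert_of_ne _ _ _ hxu,
                PySem.Dict.getD_insert_of_ne _ _ _ hxc]
            have hsum : (LETTERS.map (fun x => max 0 ((((c :: rest).count x : Int)) - max 0 (d.getD x 0)))).sum
                = (LETTERS.map (fun x => max 0 ((rest.count x : Int) - max 0 (d2.getD x 0)))).sum + 1 := by
              rw [sum_map_update LETTERS letters_nodup
                (fun x => max 0 ((((c :: rest).count x : Int)) - max 0 (d.getD x 0)))
                (fun x => max 0 ((rest.count x : Int) - max 0 (d2.getD x 0))) c hlet (by
                intro x hx hxc
                simp only []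
                rw [List.count_cons_of_ne (Ne.symm hxc), hg2x x hx hxc])]
              have hterm : max 0 (((c :: rest).count c : Int) - max 0 v)
                  - max 0 ((rest.count c : Int) - max 0 (d2.getD c 0)) = 1 := by
                rw [hg2c, List.count_cons_self]
                push_cast
                omega
              omega
            simp only [FA, hallc d2 hcont2]
            congr 1
            rw [decide_eq_decide, hsum, hg2u2, hcnt]
            omega
          · -- c's supply suffices: budget unchanged, c's count absorbed by the bag
            set d1 := d.insert c (v - 1) with hd1
            have h01 : 0 ≤ d1.getD '_' 0 := by rw [hd1, hg1u]; omega
            rw [ih d1 (hcont1 (v-1)) h01]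
            have hsum : LETTERS.map (fun x => max 0 ((rest.count x : Int) - max 0 (d1.getD x 0)))
                = LETTERS.map (fun x => max 0 ((((c :: rest).count x : Int)) - max 0 (d.getD x 0))) := by
              apply List.map_congr_left
              intro x hx
              by_cases hxc : x = c
              · subst hxc
                rw [hd1, PySem.Dict.getD_insert_self, List.count_cons_self]
                push_cast
                omega
              · rw [hd1, PySem.Dict.getD_insert_of_ne _ _ _ hxc, List.count_cons_of_ne (Ne.symm hxc)]
            have hg1u' : d1.getD '_' 0 = d.getD '_' 0 := by rw [hd1]; exact hg1u
            simp only [FA, hallc d1 (hcont1 (v-1)), hsum, hg1u', hcnt]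
        · -- c = '_': a blank tile is used directly
          subst hbl
          have hg1c : (d.insert '_' (v - 1)).getD '_' 0 = v - 1 :=
            PySem.Dict.getD_insert_self _ _ _ _
          have hg2c : ((d.insert '_' (v - 1)).insert '_' (v - 1 - 1)).getD '_' 0 = v - 1 - 1 :=
            PySem.Dict.getD_insert_self _ _ _ _
          rw [hstep]
          simp only [hg1c, hg2c]
          split_ifs with hneg hout
          · -- third blank: both sides false (note v = current '_' budget)
            rw [hbig (Or.inr rfl) (by omega) (by rw [← hv]; omega)]
          · -- impossible: v - 1 < 0 forces v - 1 - 1 < 0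
            omega
          · -- blank spent normally: budget drops by one
            set d1 := d.insert '_' (v - 1) with hd1
            have h01 : 0 ≤ d1.getD '_' 0 := by rw [hd1, hg1c]; omega
            rw [ih d1 (hcont1 (v-1)) h01]
            have hsum : LETTERS.map (fun x => max 0 ((rest.count x : Int) - max 0 (d1.getD x 0)))
                = LETTERS.map (fun x => max 0 ((((('_' : Char) :: rest).count x : Int)) - max 0 (d.getD x 0))) := by
              apply List.map_congr_left
              intro x hx
              have hxu : x ≠ '_' := (mem_letters_ne x hx).2
              rw [hd1, PySem.Dict.getD_insert_of_ne _ _ _ hxu, List.count_cons_of_ne (Ne.symm hxu)]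
            have hg1u' : d1.getD '_' 0 = v - 1 := by rw [hd1]; exact hg1c
            simp only [FA, hallc d1 (hcont1 (v-1)), hsum, hg1u', ← hv]
            congr 1
            rw [decide_eq_decide, List.count_cons_self]
            push_cast
            omega
      · -- unknown character: KeyError → False, and FA's membership conjunct fails
        have hcont : d.contains c = false := by
          rw [hd c]; simpa using hmem
        have hget : d.get? c = none := by
          rw [PySem.Dict.contains_eq_isSome_get?] at hcont
          cases hg : d.get? c with
          | none => rfl
          | some v => rw [hg] at hcont; simp at hcont
        have hfalse : loopA (c :: rest) d = false := by simp only [loopA, if_neg hq, hget]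
        rw [hfalse]
        simp [FA, List.all_cons, hq, hcont]

lemma A_eq_FA (word : String) : valid_scrabble_word word = FA word.toList bagA := by
  exact loopA_eq_FA word.toList bagA contains_bagA (by rw [bagA_blank]; omega)

-- B-side bridge facts: the zipped constant table is LETTERS paired with bagA's supplies
set_option maxRecDepth 10000 in
lemma zip_eq_letters_bag :
    letterOrder.zip letterCounts = LETTERS.map (fun c => (c, bagA.getD c 0)) := by decide

lemma letterOrder_eq : letterOrder = LETTERS := by decide

lemma B_eq_FA (word : String) : valid_scrabble_word_alt word = FA word.toList bagA := by
  unfold valid_scrabble_word_alt FA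
  set l := word.toList with hl
  -- the membership guard is the negation of FA's `all` conjunct
  have hany : l.any (fun c => !(letterOrder.contains c) && !("_?".toList.contains c))
      = !(l.all (fun c => decide (c = '?') || bagA.contains c)) := by
    rw [List.all_eq_not_any_not, Bool.not_not]
    refine List.any_congr rfl (fun c => ?_)
    rw [letterOrder_eq, contains_bagA]
    by_cases h1 : c = '?'
    · subst h1; decide
    · by_cases h2 : c = '_'
      · subst h2; decide
      · by_cases h3 : c ∈ LETTERS
        · simp [h1, h2, h3,]
        · simp [h1, h2, h3,]
  rw [hany]
  -- the zipped deficit sum is FA's sum (supplies are nonnegative, so the inner max vanishes)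
  have hsum : ((letterOrder.zip letterCounts).map
        (fun p => max 0 ((l.count p.1 : Int) - p.2))).sum
      = (LETTERS.map (fun c => max 0 ((l.count c : Int) - max 0 (bagA.getD c 0)))).sum := by
    rw [zip_eq_letters_bag, List.map_map]
    refine congrArg List.sum (List.map_congr_left fun x hx => ?_)
    have := bagA_pos x hx
    simp only [Function.comp]
    omega
  cases hall : l.all (fun c => decide (c = '?') || bagA.contains c) with
  | false => simp
  | true => simp [hsum, bagA_blank]

-- ===== VERDICT (by name: the statement is the Claim_ definition above) =====
theorem valid_scrabble_word_spec : Claim_equal_valid_scrabble_word := by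
  intro word _
  show valid_scrabble_word word = valid_scrabble_word_alt word
  rw [A_eq_FA, B_eq_FA]
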